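-- pv_equiv track=rewrite | github.com/xsenom/astro-platform | backend/app/main.py | group_aspects_by_topics
-- ===== SOURCE A (Python) =====
-- from collections import defaultdict
--
-- def group_aspects_by_topics(asps, rulers):
--     res = {}
--     planet_to_h = defaultdict(list)
--     for h, pl in rulers.items(): planet_to_h[pl].append(h)
--     for a in asps:
--         pl = a["natal"]
--         for h in planet_to_h.get(pl, []):
--             topic = topic_by_house.get(h)
--             if topic:
--                 res.setdefault(topic, []).append(a)
--     return res
--
-- topic_by_house = {
--     5: "Дети/Творчество",
--     7: "Отношения",
--     10: "Карьера"
--     # Дополните по желанию...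
-- }
-- ===== SOURCE B (Python) =====
-- def group_aspects_by_topics(asps, rulers):
--     # Group aspects by natal planet once, then emit whole buckets per ruled house.
--     by_planet = {}
--     for a in asps:
--         by_planet.setdefault(a["natal"], []).append(a)
--     res = {}
--     for pl, bucket in by_planet.items():
--         for h, p in rulers.items():
--             if p == pl:
--                 topic = topic_by_house.get(h)
--                 if topic:
--                     res[topic] = bucket
--     return res
--
-- topic_by_house = {
--     5: "Дети/Творчество",
--     7: "Отношения",
--     10: "Карьера"
-- }
-- ===== Notes on version B (the rewrite author's own statement) =====
-- stated objective: alternative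
-- what changed: A walks the aspects and, per aspect, appends it to each matching topic via an inverted house index; B instead groups all aspects by natal planet in one pass and then walks the rulers once per planet, assigning each topic its whole bucket at once (bulk assignment instead of per-aspect appends).
-- outside the precondition, e.g. on group_aspects_by_topics([{}], {7: 'Sun'}): A raises KeyError, B raises KeyError
import Mathlib
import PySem

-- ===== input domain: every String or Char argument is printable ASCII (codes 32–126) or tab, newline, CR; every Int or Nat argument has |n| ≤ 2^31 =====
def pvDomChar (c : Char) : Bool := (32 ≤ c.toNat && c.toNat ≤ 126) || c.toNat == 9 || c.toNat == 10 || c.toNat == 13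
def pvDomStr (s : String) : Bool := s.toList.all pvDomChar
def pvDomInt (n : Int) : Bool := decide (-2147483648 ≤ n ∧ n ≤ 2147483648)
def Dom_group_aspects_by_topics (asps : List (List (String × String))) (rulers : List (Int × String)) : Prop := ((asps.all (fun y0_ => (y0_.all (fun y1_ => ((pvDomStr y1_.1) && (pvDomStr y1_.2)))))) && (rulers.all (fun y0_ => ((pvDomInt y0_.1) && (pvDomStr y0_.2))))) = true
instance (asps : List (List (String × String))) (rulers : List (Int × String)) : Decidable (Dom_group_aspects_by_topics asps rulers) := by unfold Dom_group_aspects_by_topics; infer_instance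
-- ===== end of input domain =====

-- B groups aspects by natal planet once and emits whole buckets per ruled house (alternative decomposition; same results).


-- the module-level constant table
def topic_by_house : PySem.Dict Int String :=
  PySem.Dict.mk [(5, "Дети/Творчество"), (7, "Отношения"), (10, "Карьера")]

-- ===== PORT A =====
-- a["natal"] is ported as getD with default "" — the KeyError case ("natal" missing) is excluded by Pre_.
def group_aspects_by_topics (asps : List (List (String × String))) (rulers : List (Int × String)) : List (String × List (List (String × String))) :=
  let planet_to_h : PySem.Dict String (List Int) :=
    rulers.foldl (fun d hp => d.modify hp.2 [] (fun l => l ++ [hp.1])) PySem.Dict.empty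
  (asps.foldl (fun res a =>
      let pl := (PySem.Dict.mk a).getD "natal" ""
      (planet_to_h.getD pl []).foldl (fun res h =>
        match topic_by_house.get? h with
        | some topic => if topic ≠ "" then res.modify topic [] (fun l => l ++ [a]) else res
        | none => res) res)
    (PySem.Dict.empty : PySem.Dict String (List (List (String × String))))).items

-- ===== PORT B =====
def group_aspects_by_topics_alt (asps : List (List (String × String))) (rulers : List (Int × String)) : List (String × List (List (String × String))) :=
  let by_planet : PySem.Dict String (List (List (String × String))) :=
    asps.foldl (fun d a => d.modify ((PySem.Dict.mk a).getD "natal" "") [] (fun l => l ++ [a])) PySem.Dict.empty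
  (by_planet.items.foldl (fun res pb =>
      rulers.foldl (fun res hp =>
        if hp.2 == pb.1 then
          match topic_by_house.get? hp.1 with
          | some topic => if topic ≠ "" then res.insert topic pb.2 else res
          | none => res
        else res) res)
    (PySem.Dict.empty : PySem.Dict String (List (List (String × String))))).items

-- ===== PRECONDITION & SPEC =====
-- Pre_ excludes aspects without a "natal" key (Python A raises KeyError there) and association lists with
-- duplicate keys (in asps' dicts or in rulers), which are not faithful encodings of any Python dict argument.
def Pre_group_aspects_by_topics (asps : List (List (String × String))) (rulers : List (Int × String)) : Prop :=
  (rulers.map Prod.fst).Nodup ∧ ∀ a ∈ asps, (a.map Prod.fst).Nodup ∧ "natal" ∈ a.map Prod.fst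
instance (asps : List (List (String × String))) (rulers : List (Int × String)) : Decidable (Pre_group_aspects_by_topics asps rulers) := by unfold Pre_group_aspects_by_topics; infer_instance

def pvWitness_group_aspects_by_topics : (List (List (String × String))) × (List (Int × String)) :=
  ([[("natal", "Sun")], [("natal", "Moon")]], [(7, "Sun"), (5, "Moon")])

def Spec_group_aspects_by_topics (asps : List (List (String × String))) (rulers : List (Int × String)) (out : List (String × List (List (String × String)))) : Prop := out = group_aspects_by_topics_alt asps rulers
instance (asps : List (List (String × String))) (rulers : List (Int × String)) (out : List (String × List (List (String × String)))) : Decidable (Spec_group_aspects_by_topics asps rulers out) := by unfold Spec_group_aspects_by_topics; infer_instance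

-- ===== CLAIM (what is proved, stated in full; the proofs are below) =====
def Claim_equal_group_aspects_by_topics : Prop := ∀ (asps : List (List (String × String))) (rulers : List (Int × String)), Dom_group_aspects_by_topics asps rulers → Pre_group_aspects_by_topics asps rulers → Spec_group_aspects_by_topics asps rulers (group_aspects_by_topics asps rulers)

-- ===== LEMMAS AND PROOFS =====

-- proof-side abbreviations for the two programs' building blocks
def pvPl (a : List (String × String)) : String := (PySem.Dict.mk a).getD "natal" ""

def pvT (h : Int) : Option String :=
  match topic_by_house.get? h with
  | some t => if t ≠ "" then some t else none
  | none => none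

def pvHouses (rulers : List (Int × String)) (p : String) : List Int :=
  (rulers.filter (fun hp => hp.2 == p)).map Prod.fst

def pvTopics (rulers : List (Int × String)) (p : String) : List String :=
  (pvHouses rulers p).filterMap pvT

def pvApp (r : PySem.Dict String (List (List (String × String)))) (t : String)
    (a : List (String × String)) : PySem.Dict String (List (List (String × String))) :=
  r.modify t [] (fun l => l ++ [a])

def pvAppfold (rulers : List (Int × String)) (p : String) (a : List (String × String))
    (r : PySem.Dict String (List (List (String × String)))) :
    PySem.Dict String (List (List (String × String))) :=
  (pvTopics rulers p).foldl (fun r t => pvApp r t a) r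

def pvAres (rulers : List (Int × String)) (asps : List (List (String × String))) :
    PySem.Dict String (List (List (String × String))) :=
  asps.foldl (fun r a => pvAppfold rulers (pvPl a) a r) PySem.Dict.empty

def pvGroup (asps : List (List (String × String))) :
    PySem.Dict String (List (List (String × String))) :=
  asps.foldl (fun d a => d.modify (pvPl a) [] (fun l => l ++ [a])) PySem.Dict.empty

def pvBfold (rulers : List (Int × String)) (L : List (String × List (List (String × String))))
    (r : PySem.Dict String (List (List (String × String)))) :
    PySem.Dict String (List (List (String × String))) :=
  L.foldl (fun r pb => (pvTopics rulers pb.1).foldl (fun r t => r.insert t pb.2) r) r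

theorem pvT_some_iff (h : Int) (t : String) :
    pvT h = some t ↔ (h = 5 ∧ t = "Дети/Творчество") ∨ (h = 7 ∧ t = "Отношения") ∨ (h = 10 ∧ t = "Карьера") := by
  unfold pvT topic_by_house
  simp only [PySem.Dict.get?]
  by_cases h5 : h = 5
  · subst h5; simp [List.find?]; exact eq_comm
  · by_cases h7 : h = 7
    · subst h7; simp [List.find?]; exact eq_comm
    · by_cases h10 : h = 10
      · subst h10; simp [List.find?]; exact eq_comm
      · simp [List.find?, h5, h7, h10,
          show ((5:Int) == h) = false by simp [Ne.symm h5],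
          show ((7:Int) == h) = false by simp [Ne.symm h7],
          show ((10:Int) == h) = false by simp [Ne.symm h10]]

theorem pvT_inj {h1 h2 : Int} {t : String} (e1 : pvT h1 = some t) (e2 : pvT h2 = some t) :
    h1 = h2 := by
  rw [pvT_some_iff] at e1 e2
  rcases e1 with ⟨rfl, rfl⟩ | ⟨rfl, rfl⟩ | ⟨rfl, rfl⟩ <;>
    rcases e2 with ⟨rfl, h⟩ | ⟨rfl, h⟩ | ⟨rfl, h⟩ <;> first | rfl | (exfalso; simp at h)

-- A's planet_to_h lookup is exactly pvHouses
theorem pvPlanetToH (rulers : List (Int × String)) (p : String) :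
    (rulers.foldl (fun d hp => d.modify hp.2 [] (fun l => l ++ [hp.1]))
        (PySem.Dict.empty : PySem.Dict String (List Int))).getD p []
      = pvHouses rulers p := by
  have hmap : rulers.foldl (fun d hp => d.modify hp.2 [] (fun l => l ++ [hp.1]))
        (PySem.Dict.empty : PySem.Dict String (List Int))
      = (rulers.map (fun hp => (hp.2, hp.1))).foldl
          (fun d q => d.modify q.1 [] (fun l => l ++ [q.2])) PySem.Dict.empty := by
    rw [List.foldl_map]
  rw [hmap, PySem.Dict.getD_foldl_modify_append]
  simp [pvHouses, PySem.Dict.getD_empty, List.filter_map, List.map_map, Function.comp_def]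

theorem pvGroup_append (l : List (List (String × String))) (a : List (String × String)) :
    pvGroup (l ++ [a]) = (pvGroup l).insert (pvPl a) ((pvGroup l).getD (pvPl a) [] ++ [a]) := by
  simp [pvGroup, List.foldl_append, PySem.Dict.modify]

theorem pvGroup_keys_nodup (l : List (List (String × String))) : (pvGroup l).keys.Nodup := by
  unfold pvGroup
  exact PySem.Dict.nodup_keys_foldl_modify_key l pvPl [] (fun _ a => fun s => s ++ [a]) _
    PySem.Dict.nodup_keys_empty

theorem pvMem_keys_pvGroup {l : List (List (String × String))} {p : String} :
    p ∈ (pvGroup l).keys ↔ ∃ a ∈ l, pvPl a = p := by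
  unfold pvGroup
  rw [PySem.Dict.keys_foldl_modify_key l pvPl [] (fun _ a => fun s => s ++ [a])]
  simp [PySem.Dict.keys_empty, PySem.Set.update_nil_left, PySem.Set.mem_ofList, List.mem_map]

-- membership of a house in pvHouses
theorem pvMem_houses {rulers : List (Int × String)} {p : String} {h : Int} :
    h ∈ pvHouses rulers p ↔ ∃ s, (h, s) ∈ rulers ∧ s = p := by
  simp only [pvHouses, List.mem_map, List.mem_filter]
  constructor
  · rintro ⟨⟨h', s⟩, ⟨hm, hb⟩, rfl⟩
    exact ⟨s, hm, by simpa using hb⟩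
  · rintro ⟨s, hm, rfl⟩
    exact ⟨(h, s), ⟨hm, by simp⟩, rfl⟩

theorem pvTopics_disjoint {rulers : List (Int × String)}
    (hnd : (rulers.map Prod.fst).Nodup) {p q : String} (hpq : p ≠ q) {t : String}
    (ht : t ∈ pvTopics rulers p) : t ∉ pvTopics rulers q := by
  intro ht'
  simp only [pvTopics, List.mem_filterMap] at ht ht'
  obtain ⟨h1, hh1, e1⟩ := ht
  obtain ⟨h2, hh2, e2⟩ := ht'
  have hh : h1 = h2 := pvT_inj e1 e2
  subst hh
  obtain ⟨s1, hm1, rfl⟩ := pvMem_houses.mp hh1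
  obtain ⟨s2, hm2, rfl⟩ := pvMem_houses.mp hh2
  exact hpq (congrArg Prod.snd (List.inj_on_of_nodup_map hnd hm1 hm2 rfl))

theorem pvTopics_nodup (rulers : List (Int × String))
    (hnd : (rulers.map Prod.fst).Nodup) (p : String) : (pvTopics rulers p).Nodup := by
  have hsub : List.Sublist (pvHouses rulers p) (rulers.map Prod.fst) :=
    List.Sublist.map Prod.fst List.filter_sublist
  exact List.Nodup.filterMap (fun a b c e1 e2 => pvT_inj e1 e2) (hnd.sublist hsub)

-- two inserts at distinct keys commute when the first key is already present
theorem pvInsert_comm {d : PySem.Dict String (List (List (String × String)))} {t t' : String}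
    (hne : t ≠ t') (hmem : t ∈ d.keys)
    (v w : List (List (String × String))) :
    (d.insert t' v).insert t w = (d.insert t w).insert t' v := by
  have hct : d.contains t = true := (PySem.Dict.contains_iff_mem_keys d t).mpr hmem
  have hbt : (t == t') = false := by simp [hne]
  have hbt' : (t' == t) = false := by simp [Ne.symm hne]
  apply PySem.Dict.ext
  by_cases hct' : d.contains t' = true
  case pos =>
    have h1 : (d.insert t' v).contains t = true := by
      rw [PySem.Dict.contains_insert, hbt, hct]; rfl
    have h2 : (d.insert t w).contains t' = true := by
      rw [PySem.Dict.contains_insert, hbt', hct']; rfl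
    rw [PySem.Dict.items_insert_of_contains _ _ h1, PySem.Dict.items_insert_of_contains _ _ hct',
        PySem.Dict.items_insert_of_contains _ _ h2, PySem.Dict.items_insert_of_contains _ _ hct]
    simp only [List.map_map]
    apply List.map_congr_left
    intro q _
    by_cases hq : q.1 = t'
    · simp [Function.comp, hq, hbt']
    · by_cases hq2 : q.1 = t <;> simp [Function.comp, hq, hq2, hbt]
  case neg =>
    replace hct' : d.contains t' = false := by simpa using hct'
    have h1 : (d.insert t' v).contains t = true := by
      rw [PySem.Dict.contains_insert, hbt, hct]; rfl
    have h2 : (d.insert t w).contains t' = false := by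
      rw [PySem.Dict.contains_insert, hbt', hct']; rfl
    rw [PySem.Dict.items_insert_of_contains _ _ h1, PySem.Dict.items_insert_of_not_contains _ _ hct',
        PySem.Dict.items_insert_of_not_contains _ _ h2, PySem.Dict.items_insert_of_contains _ _ hct]
    rw [List.map_append]
    simp
    exact fun h => absurd h (Ne.symm hne)

-- getD is unchanged by an insert-fold over other keys
theorem pvGetD_foldl_insert {ts : List String} {t : String} (h : t ∉ ts)
    (v : String → List (List (String × String)))
    (d : PySem.Dict String (List (List (String × String)))) :
    (ts.foldl (fun r t' => r.insert t' (v t')) d).getD t [] = d.getD t [] := by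
  induction ts generalizing d with
  | nil => rfl
  | cons u us ih =>
    have hne : t ≠ u := by intro e; exact h (by simp [e])
    rw [List.foldl_cons, ih (by intro hm; exact h (by simp [hm]))]
    exact PySem.Dict.getD_insert_of_ne _ _ _ hne

theorem pvMem_keys_foldl_insert_of_mem (v : String → List (List (String × String))) :
    ∀ (ts : List String) {t : String} (d : PySem.Dict String (List (List (String × String)))),
      t ∈ d.keys → t ∈ (ts.foldl (fun r t' => r.insert t' (v t')) d).keys
  | [], _, _, h => h
  | u :: us, _, d, h =>
    pvMem_keys_foldl_insert_of_mem v us (d.insert u (v u))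
      ((PySem.Dict.mem_keys_insert _ _ _ _).mpr (Or.inr h))

theorem pvMem_keys_foldl_insert (v : String → List (List (String × String))) :
    ∀ (ts : List String) {t : String}, t ∈ ts →
      ∀ (d : PySem.Dict String (List (List (String × String)))),
        t ∈ (ts.foldl (fun r t' => r.insert t' (v t')) d).keys := by
  intro ts
  induction ts with
  | nil => intro t h; cases h
  | cons u us ih =>
    intro t h d
    rw [List.foldl_cons]
    rcases List.mem_cons.mp h with rfl | hm
    · exact pvMem_keys_foldl_insert_of_mem v us _
        ((PySem.Dict.mem_keys_insert _ _ _ _).mpr (Or.inl rfl))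
    · exact ih hm _

-- key membership through pvApp
theorem pvMem_keys_app {d : PySem.Dict String (List (List (String × String)))}
    {t u : String} {a : List (String × String)} (h : t ∈ d.keys) : t ∈ (pvApp d u a).keys := by
  unfold pvApp
  rw [PySem.Dict.modify]
  exact (PySem.Dict.mem_keys_insert _ _ _ _).mpr (Or.inr h)

theorem pvMem_keys_app_iff {d : PySem.Dict String (List (List (String × String)))}
    {t u : String} {a : List (String × String)} :
    t ∈ (pvApp d u a).keys ↔ t = u ∨ t ∈ d.keys := by
  unfold pvApp
  rw [PySem.Dict.modify]
  exact PySem.Dict.mem_keys_insert _ _ _ _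

-- pvApp at a present key commutes with an insert at a different key
theorem pvApp_insert_comm {d : PySem.Dict String (List (List (String × String)))}
    {t t' : String} (hne : t ≠ t') (hmem : t ∈ d.keys)
    (v : List (List (String × String))) (a : List (String × String)) :
    pvApp (d.insert t' v) t a = (pvApp d t a).insert t' v := by
  unfold pvApp
  rw [PySem.Dict.modify, PySem.Dict.modify]
  rw [PySem.Dict.getD_insert_of_ne _ _ _ hne]
  exact pvInsert_comm hne hmem v _

-- an app-fold over present keys commutes with an insert at a key outside it
theorem pvAppfold_insert_comm {ts : List String} {t' : String} (h : t' ∉ ts)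
    {d : PySem.Dict String (List (List (String × String)))}
    (hmem : ∀ t ∈ ts, t ∈ d.keys) (v : List (List (String × String)))
    (a : List (String × String)) :
    ts.foldl (fun r t => pvApp r t a) (d.insert t' v)
      = (ts.foldl (fun r t => pvApp r t a) d).insert t' v := by
  induction ts generalizing d with
  | nil => rfl
  | cons u us ih =>
    have hne : u ≠ t' := by intro e; exact h (by simp [e])
    rw [List.foldl_cons, List.foldl_cons,
        pvApp_insert_comm hne (hmem u (by simp)) v a]
    exact ih (by intro hm; exact h (by simp [hm]))
      (fun t ht => pvMem_keys_app (hmem t (by simp [ht])))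

-- an insert-fold at fixed value commutes with an insert at a present outside key
theorem pvInsfold_insert_comm {ts : List String} {t : String} (h : t ∉ ts)
    {d : PySem.Dict String (List (List (String × String)))} (hmem : t ∈ d.keys)
    (b w : List (List (String × String))) :
    ts.foldl (fun r t' => r.insert t' b) (d.insert t w)
      = (ts.foldl (fun r t' => r.insert t' b) d).insert t w := by
  induction ts generalizing d with
  | nil => rfl
  | cons u us ih =>
    have hne : t ≠ u := by intro e; exact h (by simp [e])
    rw [List.foldl_cons, List.foldl_cons, ← pvInsert_comm hne hmem b w]
    exact ih (by intro hm; exact h (by simp [hm]))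
      ((PySem.Dict.mem_keys_insert _ _ _ _).mpr (Or.inr hmem))

-- bulk-insert with bucket b ++ [a] equals bulk-insert with b followed by appending a at each key
theorem pvTopicfold_bucket_append {ts : List String} (hnod : ts.Nodup)
    (b : List (List (String × String))) (a : List (String × String))
    (r : PySem.Dict String (List (List (String × String)))) :
    ts.foldl (fun r t => r.insert t (b ++ [a])) r
      = ts.foldl (fun r' t => pvApp r' t a) (ts.foldl (fun r t => r.insert t b) r) := by
  induction ts generalizing r with
  | nil => rfl
  | cons t rest ih =>
    have hnotin : t ∉ rest := (List.nodup_cons.mp hnod).1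
    have hnr : rest.Nodup := (List.nodup_cons.mp hnod).2
    rw [List.foldl_cons, List.foldl_cons, List.foldl_cons]
    have hgd : (rest.foldl (fun r t' => r.insert t' b) (r.insert t b)).getD t [] = b := by
      rw [pvGetD_foldl_insert hnotin (fun _ => b) (r.insert t b), PySem.Dict.getD_insert_self]
    have happ : pvApp (rest.foldl (fun r t' => r.insert t' b) (r.insert t b)) t a
        = rest.foldl (fun r t' => r.insert t' b) (r.insert t (b ++ [a])) := by
      unfold pvApp
      rw [PySem.Dict.modify, hgd,
          ← pvInsfold_insert_comm hnotin ((PySem.Dict.mem_keys_insert _ _ _ _).mpr (Or.inl rfl)) b (b ++ [a]),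
          PySem.Dict.insert_insert_self]
    rw [happ, ih hnr]

-- the appended-aspect fold commutes past an insert-fold with disjoint keys
theorem pvAppfold_insfold_comm {us : List String} {ts : List String}
    (hdisj : ∀ t ∈ ts, t ∉ us)
    {r : PySem.Dict String (List (List (String × String)))}
    (hmem : ∀ t ∈ ts, t ∈ r.keys)
    (b : List (List (String × String))) (a : List (String × String)) :
    us.foldl (fun r u => r.insert u b) (ts.foldl (fun r t => pvApp r t a) r)
      = ts.foldl (fun r t => pvApp r t a) (us.foldl (fun r u => r.insert u b) r) := by
  induction us generalizing r with
  | nil => rfl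
  | cons u us' ih =>
    have hu : u ∉ ts := by intro hm; exact hdisj u hm (by simp)
    rw [List.foldl_cons, List.foldl_cons, ← pvAppfold_insert_comm hu hmem b a]
    exact ih (fun t ht hm => hdisj t ht (by simp [hm]))
      (fun t ht => (PySem.Dict.mem_keys_insert _ _ _ _).mpr (Or.inr (hmem t ht)))

theorem pvAppfold_Bfold_comm (rulers : List (Int × String)) {p : String}
    {L : List (String × List (List (String × String)))}
    (hdisj : ∀ q ∈ L, ∀ t ∈ pvTopics rulers p, t ∉ pvTopics rulers q.1)
    {r : PySem.Dict String (List (List (String × String)))}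
    (hmem : ∀ t ∈ pvTopics rulers p, t ∈ r.keys) (a : List (String × String)) :
    pvBfold rulers L (pvAppfold rulers p a r)
      = pvAppfold rulers p a (pvBfold rulers L r) := by
  induction L generalizing r with
  | nil => rfl
  | cons q L' ih =>
    unfold pvBfold pvAppfold at *
    rw [List.foldl_cons, List.foldl_cons,
        pvAppfold_insfold_comm (hdisj q (by simp)) hmem q.2 a]
    exact ih (fun q' hq' => hdisj q' (by simp [hq']))
      (fun t ht => pvMem_keys_foldl_insert_of_mem _ _ _ (hmem t ht))

-- bulk-insert of a fresh singleton bucket equals the per-aspect append fold on fresh keys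
theorem pvFreshfold {ts : List String} (hnod : ts.Nodup) (a : List (String × String))
    {r : PySem.Dict String (List (List (String × String)))}
    (hfresh : ∀ t ∈ ts, t ∉ r.keys) :
    ts.foldl (fun r t => r.insert t [a]) r = ts.foldl (fun r t => pvApp r t a) r := by
  induction ts generalizing r with
  | nil => rfl
  | cons t rest ih =>
    have hct : r.contains t = false := by
      rw [← Bool.not_eq_true, PySem.Dict.contains_iff_mem_keys]
      exact hfresh t (by simp)
    have hgd : r.getD t [] = [] := PySem.Dict.getD_of_not_contains _ _ hct
    rw [List.foldl_cons, List.foldl_cons]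
    have happ : pvApp r t a = r.insert t [a] := by
      unfold pvApp; rw [PySem.Dict.modify, hgd]; rfl
    rw [happ]
    exact ih (List.nodup_cons.mp hnod).2 (fun t' ht' hm => by
      rcases (PySem.Dict.mem_keys_insert _ _ _ _).mp hm with rfl | hm'
      · exact (List.nodup_cons.mp hnod).1 ht'
      · exact hfresh t' (by simp [ht']) hm')

-- every key of pvAres comes from the topics of some processed aspect
theorem pvMem_keys_appfold {ts : List String} {t : String}
    {r : PySem.Dict String (List (List (String × String)))} {a : List (String × String)}
    (h : t ∈ (ts.foldl (fun r t => pvApp r t a) r).keys) : t ∈ r.keys ∨ t ∈ ts := by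
  induction ts generalizing r with
  | nil => exact Or.inl h
  | cons u us ih =>
    rw [List.foldl_cons] at h
    rcases ih h with hm | hm
    · rcases pvMem_keys_app_iff.mp hm with rfl | hm'
      · exact Or.inr (by simp)
      · exact Or.inl hm'
    · exact Or.inr (by simp [hm])

theorem pvMem_keys_pvAres_aux {rulers : List (Int × String)}
    {l : List (List (String × String))} {t : String}
    {r : PySem.Dict String (List (List (String × String)))}
    (h : t ∈ (l.foldl (fun r a => pvAppfold rulers (pvPl a) a r) r).keys) :
    t ∈ r.keys ∨ ∃ a ∈ l, t ∈ pvTopics rulers (pvPl a) := by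
  induction l generalizing r with
  | nil => exact Or.inl h
  | cons a l' ih =>
    rw [List.foldl_cons] at h
    rcases ih h with hm | ⟨a', ha', ht⟩
    · unfold pvAppfold at hm
      rcases pvMem_keys_appfold hm with hm' | hm'
      · exact Or.inl hm'
      · exact Or.inr ⟨a, by simp, hm'⟩
    · exact Or.inr ⟨a', by simp [ha'], ht⟩

theorem pvMem_keys_pvAres {rulers : List (Int × String)}
    {l : List (List (String × String))} {t : String}
    (h : t ∈ (pvAres rulers l).keys) : ∃ a ∈ l, t ∈ pvTopics rulers (pvPl a) := by
  unfold pvAres at h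
  rcases pvMem_keys_pvAres_aux h with hm | hm
  · simp [PySem.Dict.keys_empty] at hm
  · exact hm

-- MAIN: the two abstract accumulations agree
theorem pvMain (rulers : List (Int × String)) (hnd : (rulers.map Prod.fst).Nodup)
    (asps : List (List (String × String))) :
    pvAres rulers asps = pvBfold rulers (pvGroup asps).items PySem.Dict.empty := by
  induction asps using List.reverseRecOn with
  | nil => rfl
  | append_singleton l a ih =>
    have hA : pvAres rulers (l ++ [a]) = pvAppfold rulers (pvPl a) a (pvAres rulers l) := by
      simp [pvAres, List.foldl_append]
    rw [hA, pvGroup_append]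
    set p := pvPl a with hp
    set G := pvGroup l with hG
    set b := G.getD p [] with hb
    by_cases hc : G.contains p = true
    · -- p already has a bucket: its entry is updated in place
      obtain ⟨x, hx⟩ : ∃ x, G.get? p = some x := by
        rw [PySem.Dict.contains_eq_isSome_get?] at hc
        exact Option.isSome_iff_exists.mp hc
      have hbx : b = x := by rw [hb, PySem.Dict.getD_eq_get?_getD, hx]; rfl
      have hmem_items : (p, b) ∈ G.items := hbx ▸ PySem.Dict.mem_items_of_get?_eq_some G hx
      obtain ⟨L1, L2, hsplit⟩ := List.mem_iff_append.mp hmem_items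
      have hknd : (G.items.map Prod.fst).Nodup := pvGroup_keys_nodup l
      rw [hsplit, List.map_append, List.map_cons] at hknd
      obtain ⟨hnd1, hnd2, hdisj12⟩ := List.nodup_append.mp hknd
      have hpL1 : p ∉ L1.map Prod.fst := fun hm => hdisj12 p hm p (by simp) rfl
      have hpL2 : p ∉ L2.map Prod.fst := (List.nodup_cons.mp hnd2).1
      have hupd : ∀ (w : List (List (String × String))) (M : List (String × List (List (String × String)))),
          p ∉ M.map Prod.fst →
          M.map (fun q => if (q.1 == p) = true then (p, w) else q) = M := by
        intro w M hM
        conv_rhs => rw [← List.map_id M]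
        apply List.map_congr_left
        intro q hq
        have hqp : q.1 ≠ p := fun e => hM (e ▸ List.mem_map_of_mem hq)
        simp [hqp]
      have hitems : (G.insert p (b ++ [a])).items = L1 ++ (p, b ++ [a]) :: L2 := by
        rw [PySem.Dict.items_insert_of_contains _ _ hc, hsplit, List.map_append, List.map_cons]
        rw [hupd _ L1 hpL1, hupd _ L2 hpL2]
        simp
      have hsplitfold : ∀ (e : String × List (List (String × String)))
          (r : PySem.Dict String (List (List (String × String)))),
          pvBfold rulers (L1 ++ e :: L2) r
            = pvBfold rulers L2 ((pvTopics rulers e.1).foldl (fun r t => r.insert t e.2)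
                (pvBfold rulers L1 r)) := by
        intro e r
        unfold pvBfold
        rw [List.foldl_append, List.foldl_cons]
      rw [hitems, ih, hsplit, hsplitfold, hsplitfold]
      have hdisj : ∀ q ∈ L2, ∀ t ∈ pvTopics rulers p, t ∉ pvTopics rulers q.1 := by
        intro q hq t ht
        have hqp : p ≠ q.1 := fun e => hpL2 (e ▸ List.mem_map_of_mem hq)
        exact pvTopics_disjoint hnd hqp ht
      have hmem : ∀ t ∈ pvTopics rulers p,
          t ∈ ((pvTopics rulers p).foldl (fun r t => r.insert t b)
                (pvBfold rulers L1 PySem.Dict.empty)).keys :=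
        fun t ht => pvMem_keys_foldl_insert (fun _ => b) _ ht _
      rw [← pvAppfold_Bfold_comm rulers hdisj hmem a]
      congr 1
      unfold pvAppfold
      exact (pvTopicfold_bucket_append (pvTopics_nodup rulers hnd p) b a _).symm
    · -- p is a fresh planet: a new entry is appended
      have hb0 : b = [] := PySem.Dict.getD_of_not_contains _ _ (by simpa using hc)
      have hitems : (G.insert p (b ++ [a])).items = G.items ++ [(p, [a])] := by
        rw [PySem.Dict.items_insert_of_not_contains _ _ (by simpa using hc), hb0]
        rfl
      have hBsplit : pvBfold rulers (G.items ++ [(p, [a])]) PySem.Dict.empty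
          = (pvTopics rulers p).foldl (fun r t => r.insert t [a])
              (pvBfold rulers G.items PySem.Dict.empty) := by
        unfold pvBfold
        rw [List.foldl_append]
        rfl
      rw [hitems, hBsplit, ← ih]
      have hfresh : ∀ t ∈ pvTopics rulers p, t ∉ (pvAres rulers l).keys := by
        intro t ht hmem
        obtain ⟨a', ha', ht'⟩ := pvMem_keys_pvAres hmem
        by_cases he : pvPl a' = p
        · rw [he] at ht'
          exact absurd ((PySem.Dict.contains_iff_mem_keys G p).mpr
            (pvMem_keys_pvGroup.mpr ⟨a', ha', he⟩)) (by simpa using hc)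
        · exact pvTopics_disjoint hnd he ht' ht
      rw [pvFreshfold (pvTopics_nodup rulers hnd p) a hfresh]
      rfl

-- A's inner loop over a planet's houses is the app-fold over the houses' topics
theorem pvAfold (a : List (String × String)) (hs : List Int)
    (res : PySem.Dict String (List (List (String × String)))) :
    hs.foldl (fun res h =>
        match topic_by_house.get? h with
        | some topic => if topic ≠ "" then res.modify topic [] (fun l => l ++ [a]) else res
        | none => res) res
      = (hs.filterMap pvT).foldl (fun r t => pvApp r t a) res := by
  induction hs generalizing res with
  | nil => rfl
  | cons h hs ih =>
    rw [List.foldl_cons, List.filterMap_cons]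
    cases hg : topic_by_house.get? h with
    | none =>
      have hT : pvT h = none := by unfold pvT; rw [hg]
      rw [hT, ih]
    | some topic =>
      by_cases ht : topic = ""
      · have hT : pvT h = none := by unfold pvT; rw [hg]; simp [ht]
        rw [hT]
        simp only [ht, ne_eq, not_true_eq_false, if_false]
        exact ih res
      · have hT : pvT h = some topic := by unfold pvT; rw [hg]; simp [ht]
        rw [hT, List.foldl_cons]
        simp only [ne_eq, ht, not_false_eq_true, if_true]
        exact ih _

-- B's inner loop over rulers for one planet bucket is the insert-fold over that planet's topics
theorem pvBinner (pb : String × List (List (String × String))) (rulers : List (Int × String))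
    (res : PySem.Dict String (List (List (String × String)))) :
    rulers.foldl (fun res hp =>
        if hp.2 == pb.1 then
          match topic_by_house.get? hp.1 with
          | some topic => if topic ≠ "" then res.insert topic pb.2 else res
          | none => res
        else res) res
      = (pvTopics rulers pb.1).foldl (fun r t => r.insert t pb.2) res := by
  induction rulers generalizing res with
  | nil => rfl
  | cons hp rs ih =>
    rw [List.foldl_cons]
    unfold pvTopics pvHouses
    rw [List.filter_cons]
    by_cases hm : (hp.2 == pb.1) = true
    · rw [if_pos hm, if_pos hm]
      rw [List.map_cons, List.filterMap_cons]
      cases hg : topic_by_house.get? hp.1 with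
      | none =>
        have hT : pvT hp.1 = none := by unfold pvT; rw [hg]
        rw [hT]
        exact ih _
      | some topic =>
        by_cases ht : topic = ""
        · have hT : pvT hp.1 = none := by unfold pvT; rw [hg]; simp [ht]
          rw [hT]
          simp only [ht, ne_eq, not_true_eq_false, if_false]
          exact ih _
        · have hT : pvT hp.1 = some topic := by unfold pvT; rw [hg]; simp [ht]
          rw [hT, List.foldl_cons]
          simp only [ne_eq, ht, not_false_eq_true, if_true]
          exact ih _
    · rw [if_neg hm, if_neg hm]
      exact ih _

-- bridge: port A computes pvAres
theorem pvBridgeA (asps : List (List (String × String))) (rulers : List (Int × String)) :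
    group_aspects_by_topics asps rulers = (pvAres rulers asps).items := by
  simp only [group_aspects_by_topics]
  congr 1
  unfold pvAres
  apply List.foldl_ext
  intro res a _
  rw [pvPlanetToH, pvAfold]
  rfl

-- bridge: port B computes pvBfold over pvGroup
theorem pvBridgeB (asps : List (List (String × String))) (rulers : List (Int × String)) :
    group_aspects_by_topics_alt asps rulers
      = (pvBfold rulers (pvGroup asps).items PySem.Dict.empty).items := by
  simp only [group_aspects_by_topics_alt]
  congr 1
  unfold pvBfold pvGroup pvPl
  apply List.foldl_ext
  intro res pb _
  exact pvBinner pb rulers res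

-- ===== VERDICT (by name: the statement is the Claim_ definition above) =====
theorem group_aspects_by_topics_spec : Claim_equal_group_aspects_by_topics := by
  intro asps rulers _ hpre
  unfold Spec_group_aspects_by_topics
  rw [pvBridgeA, pvBridgeB, pvMain rulers hpre.1 asps]
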